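-- pv_equiv track=rewrite | github.com/DominikWojtanowski/Matura-informatyka | 2012 - Maj/Zadanie 2/zadanie_2.py | maxOsiagalna
-- ===== SOURCE A (Python) =====
-- def maxOsiagalna(liczba:int):
--     pocz_liczba = str(liczba)
--
--     max_sum = pocz_liczba
--     if max_sum[0] >= '1':
--         max_sum = chr(ord(pocz_liczba[0]) - 1) + ''.join(['9' for i in range(1,max_sum.__len__())])
--     else:
--         max_sum = ''.join(['9' for i in range(1,max_sum.__len__())])
--
--     sum = 0
--     for i in max_sum:
--         sum += ord(i) - ord('0')
--
--     return sum
-- ===== SOURCE B (Python) =====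
-- def maxOsiagalna(liczba: int):
--     # closed form: digit-sum of the max reachable string is (first digit - 1) + 9*(len-1),
--     # or 9*(len-1) when the first character is below '1' (zero / negative sign)
--     s = str(liczba)
--     if s[0] >= '1':
--         return (ord(s[0]) - ord('0') - 1) + 9 * (len(s) - 1)
--     return 9 * (len(s) - 1)
-- ===== Notes on version B (the rewrite author's own statement) =====
-- stated objective: simpler
-- what changed: Replaces building the '9…9' string and summing its character codes in a loop with a direct closed-form arithmetic expression over the first character and the string length.
import Mathlib
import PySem

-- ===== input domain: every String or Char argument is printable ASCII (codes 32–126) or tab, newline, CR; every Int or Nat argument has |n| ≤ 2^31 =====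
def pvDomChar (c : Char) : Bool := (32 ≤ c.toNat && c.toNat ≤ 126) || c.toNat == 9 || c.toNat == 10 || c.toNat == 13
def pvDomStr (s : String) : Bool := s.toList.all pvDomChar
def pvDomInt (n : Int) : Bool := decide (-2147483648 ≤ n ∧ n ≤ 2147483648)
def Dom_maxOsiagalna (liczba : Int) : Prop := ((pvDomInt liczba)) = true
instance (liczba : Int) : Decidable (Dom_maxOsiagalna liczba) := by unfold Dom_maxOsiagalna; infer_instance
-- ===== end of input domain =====

-- B replaces A's build-a-string-of-nines-and-sum-its-characters loop with a closed-form
-- arithmetic expression over the first character and the length of str(liczba) (objective: simpler).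

-- ===== PORT A =====
def maxOsiagalna (liczba : Int) : Int :=
  -- pocz_liczba = str(liczba)
  let pocz_liczba := PySem.Int.toChars liczba
  -- max_sum[0] (str(liczba) is never empty, so the [0] index is always in range; default unused)
  let c0 := PySem.List.pyGetD pocz_liczba 0 '0'
  let max_sum :=
    if ('1' : Char) ≤ c0 then
      -- chr(ord(pocz_liczba[0]) - 1) + ''.join(['9' for i in range(1, len)])
      Char.ofNat (c0.toNat - 1) :: (PySem.List.pyRange 1 (PySem.List.len pocz_liczba) 1).map (fun _ => '9')
    else
      (PySem.List.pyRange 1 (PySem.List.len pocz_liczba) 1).map (fun _ => '9')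
  -- sum = 0; for i in max_sum: sum += ord(i) - ord('0')   (ord '0' = 48)
  max_sum.foldl (fun s c => s + ((c.toNat : Int) - 48)) 0

-- ===== PORT B =====
def maxOsiagalna_alt (liczba : Int) : Int :=
  let s := PySem.Int.toChars liczba
  let c0 := PySem.List.pyGetD s 0 '0'   -- s[0]; str(liczba) is never empty
  if ('1' : Char) ≤ c0 then ((c0.toNat : Int) - 48 - 1) + 9 * (PySem.List.len s - 1)
  else 9 * (PySem.List.len s - 1)

-- ===== PRECONDITION & SPEC =====
def Spec_maxOsiagalna (liczba : Int) (out : Int) : Prop := out = maxOsiagalna_alt liczba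
instance (liczba : Int) (out : Int) : Decidable (Spec_maxOsiagalna liczba out) := by unfold Spec_maxOsiagalna; infer_instance

-- ===== CLAIM (what is proved, stated in full; the proofs are below) =====
def Claim_equal_maxOsiagalna : Prop := ∀ (liczba : Int), Dom_maxOsiagalna liczba → Spec_maxOsiagalna liczba (maxOsiagalna liczba)

-- ===== LEMMAS AND PROOFS =====

lemma digitChar_lt (m : Nat) : (Nat.digitChar m).toNat < 128 := by
  rcases m with _|_|_|_|_|_|_|_|_|_|_|_|_|_|_|_|m
  · decide
  · decide
  · decide
  · decide
  · decide
  · decide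
  · decide
  · decide
  · decide
  · decide
  · decide
  · decide
  · decide
  · decide
  · decide
  · decide
  · unfold Nat.digitChar
    rw [if_neg (show ¬ (m + 16 = 0) by omega), if_neg (show ¬ (m + 16 = 1) by omega), if_neg (show ¬ (m + 16 = 2) by omega), if_neg (show ¬ (m + 16 = 3) by omega), if_neg (show ¬ (m + 16 = 4) by omega), if_neg (show ¬ (m + 16 = 5) by omega), if_neg (show ¬ (m + 16 = 6) by omega), if_neg (show ¬ (m + 16 = 7) by omega), if_neg (show ¬ (m + 16 = 8) by omega), if_neg (show ¬ (m + 16 = 9) by omega), if_neg (show ¬ (m + 16 = 10) by omega), if_neg (show ¬ (m + 16 = 11) by omega), if_neg (show ¬ (m + 16 = 12) by omega), if_neg (show ¬ (m + 16 = 13) by omega), if_neg (show ¬ (m + 16 = 14) by omega), if_neg (show ¬ (m + 16 = 15) by omega)]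
    decide

-- every character emitted by Nat.toDigitsCore is a small (ASCII) character
lemma toDigitsCore_chars (b f n : Nat) (ds : List Char) :
    ∀ c ∈ Nat.toDigitsCore b f n ds, c ∈ ds ∨ c.toNat < 128 := by
  induction f generalizing n ds with
  | zero => intro c hc; simp [Nat.toDigitsCore] at hc; exact Or.inl hc
  | succ f ih =>
    intro c hc
    simp only [Nat.toDigitsCore] at hc
    by_cases h : n / b = 0
    · rcases List.mem_cons.mp (by simpa [h] using hc) with h1 | h1
      · right; rw [h1]; exact digitChar_lt _
      · left; exact h1
    · rcases ih (n / b) (Nat.digitChar (n % b) :: ds) c (by simpa [h] using hc) with h1 | h1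
      · rcases List.mem_cons.mp h1 with h2 | h2
        · right; rw [h2]; exact digitChar_lt _
        · left; exact h2
      · right; exact h1

-- str(n) is nonempty and its first character is a small (ASCII) character
lemma toChars_head (n : Int) : ∃ c t, PySem.Int.toChars n = c :: t ∧ c.toNat < 128 := by
  unfold PySem.Int.toChars
  split_ifs with h
  · exact ⟨'-', _, rfl, by decide⟩
  · rcases hl : Nat.toDigits 10 n.toNat with _ | ⟨c, t⟩
    · exfalso; have := @Nat.length_toDigits_pos 10 n.toNat; rw [hl] at this; simp at this
    · refine ⟨c, t, rfl, ?_⟩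
      have hmem : c ∈ Nat.toDigits 10 n.toNat := by rw [hl]; exact List.mem_cons_self
      rcases toDigitsCore_chars 10 (n.toNat + 1) n.toNat [] c hmem with h1 | h1
      · simp at h1
      · exact h1

-- A's digit-sum loop over a constant-'9' list is 9 times its length
lemma foldl_nines (xs : List Int) (a : Int) :
    (xs.map (fun _ => '9')).foldl (fun s c => s + ((c.toNat : Int) - 48)) a
      = a + 9 * xs.length := by
  induction xs generalizing a with
  | nil => simp
  | cons x xs ih =>
    simp only [List.map_cons, List.foldl_cons, ih, List.length_cons]
    push_cast; ring

lemma charOfNat_toNat (n : Nat) (h : n.isValidChar) : (Char.ofNat n).toNat = n := by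
  simp [Char.ofNat, Char.ofNatAux, Char.toNat, h]

theorem maxOsiagalna_eq_alt (liczba : Int) : maxOsiagalna liczba = maxOsiagalna_alt liczba := by
  obtain ⟨c, t, hct, hlt⟩ := toChars_head liczba
  have hget : PySem.List.pyGetD (c :: t) 0 '0' = c := by
    simp [PySem.List.pyGetD, PySem.List.pyGet?, PySem.List.pyIdx?]
  have hlen : PySem.List.len (c :: t) = (t.length : Int) + 1 := by
    simp [PySem.List.len]
  have h1 : ((t.length : Int) + 1 - 1).toNat = t.length := by omega
  simp only [maxOsiagalna, maxOsiagalna_alt, hct, hget, hlen]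
  by_cases hg : ('1' : Char) ≤ c
  · have h49 : 49 ≤ c.toNat := hg
    have hof : (Char.ofNat (c.toNat - 1)).toNat = c.toNat - 1 :=
      charOfNat_toNat _ (Or.inl (by omega))
    have h2 : ((c.toNat - 1 : Nat) : Int) = (c.toNat : Int) - 1 := by omega
    rw [if_pos hg, if_pos hg, List.foldl_cons, foldl_nines,
        PySem.List.length_pyRange_one, hof, h1, h2]
    ring
  · rw [if_neg hg, if_neg hg, foldl_nines, PySem.List.length_pyRange_one, h1]
    ring

-- ===== VERDICT (by name: the statement is the Claim_ definition above) =====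
theorem maxOsiagalna_spec : Claim_equal_maxOsiagalna := by
  intro liczba _
  unfold Spec_maxOsiagalna
  exact maxOsiagalna_eq_alt liczba
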